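-- pv_equiv track=rewrite | github.com/miqueiaspcoelho/inforgeneses-teste-logica | src/q3.py | agrupar
-- ===== SOURCE A (Python) =====
-- def agrupar(L: list[list],parametro: int):
--     maior = 0
--     vencedor =[]
--     for i in range(len(L)):
--         if (L[i][parametro][1])>=maior:
--             maior = (L[i][parametro][1])
--
--     for i in range(len(L)):
--         if (L[i][parametro][1])==maior:
--             vencedor.append(L[i][parametro][0])
--
--     return vencedor
-- ===== SOURCE B (Python) =====
-- def agrupar(L: list[list], parametro: int):
--     maior = 0
--     vencedor = []
--     for linha in L:
--         v = linha[parametro][1]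
--         if v > maior:
--             maior = v
--             vencedor = [linha[parametro][0]]
--         elif v == maior:
--             vencedor.append(linha[parametro][0])
--     return vencedor
-- ===== Notes on version B (the rewrite author's own statement) =====
-- stated objective: simpler
-- what changed: B finds the maximum and collects the winners in one pass over the rows (resetting the winner list when a strictly larger value appears) instead of A's two separate index-based passes.
import Mathlib
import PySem

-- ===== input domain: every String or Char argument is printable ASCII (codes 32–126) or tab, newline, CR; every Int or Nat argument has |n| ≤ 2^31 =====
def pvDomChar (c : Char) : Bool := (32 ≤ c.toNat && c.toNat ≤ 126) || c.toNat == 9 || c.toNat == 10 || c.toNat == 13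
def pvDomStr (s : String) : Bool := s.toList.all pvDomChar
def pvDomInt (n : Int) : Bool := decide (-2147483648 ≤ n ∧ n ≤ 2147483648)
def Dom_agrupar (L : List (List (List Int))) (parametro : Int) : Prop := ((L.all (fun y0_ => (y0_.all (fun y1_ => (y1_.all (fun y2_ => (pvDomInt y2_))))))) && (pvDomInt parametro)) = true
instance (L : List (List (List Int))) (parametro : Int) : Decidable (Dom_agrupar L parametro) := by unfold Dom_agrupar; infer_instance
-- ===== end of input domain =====

-- B replaces A's two index-based passes by a single pass over the rows that resets the
-- winner list when a strictly larger value appears (objective: simpler).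

-- ===== PORT A =====
def agrupar (L : List (List (List Int))) (parametro : Int) : List Int :=
  -- maior = 0; for i in range(len(L)): if L[i][parametro][1] >= maior: maior = ...
  let maior : Int := (PySem.List.pyRange 0 (L.length : Int) 1).foldl
    (fun m i =>
      let row := PySem.List.pyGetD L i []
      if PySem.List.pyGetD (PySem.List.pyGetD row parametro []) 1 0 ≥ m then
        PySem.List.pyGetD (PySem.List.pyGetD row parametro []) 1 0
      else m) 0
  -- vencedor = []; for i in range(len(L)): if L[i][parametro][1] == maior: vencedor.append(L[i][parametro][0])
  (PySem.List.pyRange 0 (L.length : Int) 1).foldl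
    (fun acc i =>
      let row := PySem.List.pyGetD L i []
      if PySem.List.pyGetD (PySem.List.pyGetD row parametro []) 1 0 = maior then
        acc ++ [PySem.List.pyGetD (PySem.List.pyGetD row parametro []) 0 0]
      else acc) []

-- ===== PORT B =====
def agrupar_alt (L : List (List (List Int))) (parametro : Int) : List Int :=
  (L.foldl
    (fun (s : Int × List Int) linha =>
      let v := PySem.List.pyGetD (PySem.List.pyGetD linha parametro []) 1 0
      if v > s.1 then (v, [PySem.List.pyGetD (PySem.List.pyGetD linha parametro []) 0 0])
      else if v = s.1 then (s.1, s.2 ++ [PySem.List.pyGetD (PySem.List.pyGetD linha parametro []) 0 0])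
      else s) ((0 : Int), ([] : List Int))).2

-- ===== PRECONDITION & SPEC =====
-- Pre_ excludes exactly the inputs where Python A raises IndexError: some row has no
-- element at index parametro, or that element has fewer than 2 entries.
def Pre_agrupar (L : List (List (List Int))) (parametro : Int) : Prop :=
  ∀ row ∈ L, 2 ≤ ((PySem.List.pyGet? row parametro).getD []).length
instance (L : List (List (List Int))) (parametro : Int) : Decidable (Pre_agrupar L parametro) := by unfold Pre_agrupar; infer_instance

def pvWitness_agrupar : List (List (List Int)) × Int := ([[[3, 5]], [[2, 5]], [[1, 4]]], 0)

def Spec_agrupar (L : List (List (List Int))) (parametro : Int) (out : List Int) : Prop := out = agrupar_alt L parametro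
instance (L : List (List (List Int))) (parametro : Int) (out : List Int) : Decidable (Spec_agrupar L parametro out) := by unfold Spec_agrupar; infer_instance

-- ===== CLAIM (what is proved, stated in full; the proofs are below) =====
def Claim_equal_agrupar : Prop := ∀ (L : List (List (List Int))) (parametro : Int), Dom_agrupar L parametro → Pre_agrupar L parametro → Spec_agrupar L parametro (agrupar L parametro)

-- ===== LEMMAS AND PROOFS =====

-- A's running maximum, abstracted over the per-row value function v.
def pvMaxf {ρ : Type} (v : ρ → Int) (m : Int) : List ρ → Int
  | [] => m
  | r :: t => pvMaxf v (if v r ≥ m then v r else m) t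

-- the rows of L whose value equals M, mapped through nm, in order
def pvCollect {ρ : Type} (v nm : ρ → Int) (M : Int) : List ρ → List Int
  | [] => []
  | r :: t => (if v r = M then [nm r] else []) ++ pvCollect v nm M t

theorem pvMaxf_foldl {ρ : Type} (v : ρ → Int) (m : Int) (L : List ρ) :
    L.foldl (fun m r => if v r ≥ m then v r else m) m = pvMaxf v m L := by
  induction L generalizing m with
  | nil => rfl
  | cons r t ih => simp [pvMaxf, List.foldl, ih]

theorem pvMaxf_ge {ρ : Type} (v : ρ → Int) (m : Int) (L : List ρ) :
    m ≤ pvMaxf v m L := by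
  induction L generalizing m with
  | nil => simp [pvMaxf]
  | cons r t ih =>
    simp only [pvMaxf]
    split_ifs with h
    · exact le_trans h (ih _)
    · exact ih _
theorem pvCollect_foldl {ρ : Type} (v nm : ρ → Int) (M : Int) (L : List ρ)
    (acc : List Int) :
    L.foldl (fun acc r => if v r = M then acc ++ [nm r] else acc) acc = acc ++ pvCollect v nm M L := by
  induction L generalizing acc with
  | nil => simp [pvCollect]
  | cons r t ih =>
    simp only [List.foldl, pvCollect]
    split_ifs with h <;> simp [ih]

theorem pvB_invariant {ρ : Type} (v nm : ρ → Int) (L : List ρ) (m : Int)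
    (ns : List Int) :
    L.foldl (fun (s : Int × List Int) r =>
      if v r > s.1 then (v r, [nm r])
      else if v r = s.1 then (s.1, s.2 ++ [nm r])
      else s) (m, ns)
    = (pvMaxf v m L, (if pvMaxf v m L = m then ns else []) ++ pvCollect v nm (pvMaxf v m L) L) := by
  induction L generalizing m ns with
  | nil => simp [pvMaxf, pvCollect]
  | cons r t ih =>
    simp only [List.foldl, pvMaxf, pvCollect]
    rcases lt_trichotomy (v r) m with hlt | heq | hgt
    · have h1 : ¬ v r > m := by omega
      have h2 : ¬ v r = m := by omega
      have h3 : ¬ v r ≥ m := by omega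
      simp only [if_neg h3]
      rw [if_neg h1, if_neg h2, ih]
      have hne : ¬ v r = pvMaxf v m t := by
        have := pvMaxf_ge v m t; omega
      simp [hne]
    · subst heq
      have h1 : ¬ v r > v r := lt_irrefl _
      have hge : (if v r ≥ v r then v r else v r) = v r := by simp
      simp only [hge]
      rw [if_neg h1]
      simp only [if_true]
      rw [ih]
      by_cases hM : pvMaxf v (v r) t = v r
      · simp [hM]
      · have hM' : ¬ v r = pvMaxf v (v r) t := fun h => hM h.symm
        simp [hM, hM']
    · have h1 : v r > m := hgt
      have h2 : v r ≥ m := by omega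
      simp only [if_pos h2]
      rw [if_pos h1, ih]
      have hne : ¬ pvMaxf v (v r) t = m := by
        have := pvMaxf_ge v (v r) t; omega
      rw [if_neg hne]
      by_cases hM : pvMaxf v (v r) t = v r
      · simp [hM]
      · have hM' : ¬ v r = pvMaxf v (v r) t := fun h => hM h.symm
        simp [hM, hM']

-- ===== VERDICT (by name: the statement is the Claim_ definition above) =====
theorem agrupar_spec : Claim_equal_agrupar := by
  intro L parametro _ _
  unfold Spec_agrupar agrupar agrupar_alt
  set v : List (List Int) → Int := fun row => PySem.List.pyGetD (PySem.List.pyGetD row parametro []) 1 0 with hv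
  set nm : List (List Int) → Int := fun row => PySem.List.pyGetD (PySem.List.pyGetD row parametro []) 0 0 with hnm
  rw [PySem.List.foldl_pyRange_zero_pyGetD' L ([] : List (List Int))
        (fun m row => if v row ≥ m then v row else m) 0,
      PySem.List.foldl_pyRange_zero_pyGetD' L ([] : List (List Int))
        (fun acc row => if v row = _ then acc ++ [nm row] else acc) ([] : List Int)]
  rw [pvMaxf_foldl, pvCollect_foldl, pvB_invariant v nm]
  split_ifs <;> simp
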